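-- pv_equiv track=rewrite | github.com/AAISSJ/AlgorithmStudy | week06/카드 뭉치.py | solution
-- ===== SOURCE A (Python) =====
-- def solution(cards1, cards2, goal):
--     answer = 'Yes'
--
--     check_1_or_2= [0]*len(goal)
--     check_1=[]
--     check_2=[]
--
--     for i,word in enumerate(goal) :
--         if word in cards1:
--             check_1_or_2[i] = 1
--             check_1.append(cards1.index(word))
--         elif word in cards2:
--             check_1_or_2[i] = 2
--             check_2.append(cards2.index(word))
--         else :
--             return "No"
--
--     # 테스트 케이스 주의! 카드를 사용하지 않고 다음 카드로 넘어갈 수 없습니다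
--
--     if check_1!=[]:
--         for i in range(0,len(check_1)):
--             if i!=check_1[i]:
--                 return "No"
--     if check_2!=[]:
--         for i in range(0,len(check_2)):
--             if i!=check_2[i]:
--                     return "No"
--
--     return answer
-- ===== SOURCE B (Python) =====
-- def solution(cards1, cards2, goal):
--     set1 = set(cards1)
--     set2 = set(cards2)
--     s1 = [w for w in goal if w in set1]
--     s2 = [w for w in goal if w not in set1 and w in set2]
--     if len(s1) + len(s2) != len(goal):
--         return "No"
--     if s1 == cards1[:len(s1)] and len(set(s1)) == len(s1) \
--        and s2 == cards2[:len(s2)] and len(set(s2)) == len(s2):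
--         return "Yes"
--     return "No"
-- ===== Notes on version B (the rewrite author's own statement) =====
-- stated objective: alternative
-- what changed: B extracts the goal words belonging to each deck as subsequences (membership via hash sets built once) and verifies each by a single prefix-equality plus distinctness check, instead of A's per-word list scans collecting .index values and checking them against the identity permutation.
import Mathlib
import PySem

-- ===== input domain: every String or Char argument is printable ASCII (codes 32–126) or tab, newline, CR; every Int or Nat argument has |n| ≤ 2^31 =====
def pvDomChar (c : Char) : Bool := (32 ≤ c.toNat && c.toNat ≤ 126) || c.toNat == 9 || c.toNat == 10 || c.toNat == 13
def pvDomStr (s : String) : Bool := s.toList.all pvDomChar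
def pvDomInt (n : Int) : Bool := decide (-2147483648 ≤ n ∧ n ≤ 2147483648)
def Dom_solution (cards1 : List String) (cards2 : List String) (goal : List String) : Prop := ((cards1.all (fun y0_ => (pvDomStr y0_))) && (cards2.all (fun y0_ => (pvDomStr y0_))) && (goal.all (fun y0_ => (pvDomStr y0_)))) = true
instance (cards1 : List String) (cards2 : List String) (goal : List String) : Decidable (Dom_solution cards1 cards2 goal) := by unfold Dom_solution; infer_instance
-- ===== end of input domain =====

-- B replaces A's per-word scans (.index collection checked against the identity permutation)
-- by extracting each deck's goal-subsequence and verifying it via prefix equality + distinctness.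


-- ===== PORT A =====
-- A's main loop: for word in goal, collect cards1.index(word) / cards2.index(word), or return "No".
-- (A's write-only array check_1_or_2 and the enumerate index feeding it are never read; they are omitted.
--  '.index(word)' under the membership guard is List.idxOf — exact, since the element is present.)
def solLoopA (cards1 : List String) (cards2 : List String) :
    List String → List Nat → List Nat → Option (List Nat × List Nat)
  | [], c1, c2 => some (c1, c2)
  | w :: rest, c1, c2 =>
    if cards1.contains w then solLoopA cards1 cards2 rest (c1 ++ [cards1.idxOf w]) c2
    else if cards2.contains w then solLoopA cards1 cards2 rest c1 (c2 ++ [cards2.idxOf w])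
    else none

-- A's 'for i in range(0,len(check)): if i != check[i]: return "No"' — the same index loop read sequentially.
def checkIdA : List Nat → Nat → Bool
  | [], _ => true
  | x :: rest, i => if i ≠ x then false else checkIdA rest (i + 1)

def solution (cards1 : List String) (cards2 : List String) (goal : List String) : String :=
  match solLoopA cards1 cards2 goal [] [] with
  | none => "No"
  | some (c1, c2) =>
    if c1 ≠ [] ∧ checkIdA c1 0 = false then "No"
    else if c2 ≠ [] ∧ checkIdA c2 0 = false then "No"
    else "Yes"

-- ===== PORT B =====
-- cards1[:len(s1)] is List.take (slice with a nonnegative bound); len(set(s)) is (PySem.Set.ofList s).length.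
def solution_alt (cards1 : List String) (cards2 : List String) (goal : List String) : String :=
  let set1 := PySem.Set.ofList cards1
  let set2 := PySem.Set.ofList cards2
  let s1 := goal.filter (fun w => PySem.Set.contains set1 w)
  let s2 := goal.filter (fun w => !(PySem.Set.contains set1 w) && PySem.Set.contains set2 w)
  if s1.length + s2.length ≠ goal.length then "No"
  else if s1 = cards1.take s1.length ∧ (PySem.Set.ofList s1).length = s1.length ∧
          s2 = cards2.take s2.length ∧ (PySem.Set.ofList s2).length = s2.length then "Yes"
  else "No"

-- ===== PRECONDITION & SPEC =====
def Spec_solution (cards1 : List String) (cards2 : List String) (goal : List String) (out : String) : Prop := out = solution_alt cards1 cards2 goal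
instance (cards1 : List String) (cards2 : List String) (goal : List String) (out : String) : Decidable (Spec_solution cards1 cards2 goal out) := by unfold Spec_solution; infer_instance

-- ===== CLAIM (what is proved, stated in full; the proofs are below) =====
def Claim_equal_solution : Prop := ∀ (cards1 : List String) (cards2 : List String) (goal : List String), Dom_solution cards1 cards2 goal → Spec_solution cards1 cards2 goal (solution cards1 cards2 goal)

-- ===== LEMMAS AND PROOFS =====

-- A's loop collects, in order, the first-occurrence indices of the goal words found in each deck.
lemma loopA_char (cards1 cards2 : List String) :
    ∀ (l : List String) (c1 c2 : List Nat),
      solLoopA cards1 cards2 l c1 c2 =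
        if l.all (fun w => cards1.contains w || cards2.contains w) then
          some (c1 ++ (l.filter (fun w => cards1.contains w)).map cards1.idxOf,
                c2 ++ (l.filter (fun w => !cards1.contains w && cards2.contains w)).map cards2.idxOf)
        else none := by
  intro l
  induction l with
  | nil => intro c1 c2; simp [solLoopA]
  | cons w rest ih =>
    intro c1 c2
    by_cases h1 : w ∈ cards1
    · simp [solLoopA, h1, ih]
    · by_cases h2 : w ∈ cards2
      · simp [solLoopA, h1, h2, ih]
      · simp [solLoopA, h1, h2]

lemma checkId_char : ∀ (l : List Nat) (i : Nat), checkIdA l i = true ↔ l = List.range' i l.length := by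
  intro l
  induction l with
  | nil => intro i; simp [checkIdA]
  | cons x rest ih =>
    intro i
    by_cases h : i = x
    · subst h; simp [checkIdA, List.range'_succ, ih]
    · simp [checkIdA, h, List.range'_succ]
      intro hx; exact absurd hx.symm h

-- first-occurrence indices of a Nodup prefix are the positions themselves
lemma idxOf_take_nodup : ∀ (cs : List String) (k : Nat), (cs.take k).Nodup →
    ∀ j, j < k → ∀ (hjc : j < cs.length), cs.idxOf (cs[j]) = j := by
  intro cs
  induction cs with
  | nil => intro k _ j _ hjc; simp at hjc
  | cons x t ih =>
    intro k hnd j hjk hjc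
    cases k with
    | zero => omega
    | succ k' =>
      rw [List.take_succ_cons] at hnd
      have hx : x ∉ t.take k' := (List.nodup_cons.mp hnd).1
      have hnd' : (t.take k').Nodup := (List.nodup_cons.mp hnd).2
      cases j with
      | zero => simp
      | succ j' =>
        have hjt : j' < t.length := by simpa using hjc
        have hmem : t[j'] ∈ t.take k' := by
          rw [List.mem_take_iff_getElem]
          exact ⟨j', by omega, rfl⟩
        have hne : x ≠ t[j'] := fun h => hx (h ▸ hmem)
        have : (x :: t)[j' + 1] = t[j'] := by simp
        rw [this, List.idxOf_cons_ne _ (by simpa using hne), ih k' hnd' j' (by omega) hjt]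

lemma map_idxOf_eq_range_iff (cs s : List String) (hs : ∀ w ∈ s, w ∈ cs) :
    s.map cs.idxOf = List.range' 0 s.length ↔ (s = cs.take s.length ∧ s.Nodup) := by
  constructor
  · intro h
    have hpt : ∀ j (hj : j < s.length), cs.idxOf (s[j]) = j := by
      intro j hj
      have := congrArg (fun l => l[j]?) h
      simp [List.getElem?_map, List.getElem?_eq_getElem hj,
        List.getElem?_range' (by simpa using hj)] at this
      exact this
    have hlt : ∀ j (hj : j < s.length), j < cs.length := by
      intro j hj
      have hmem : s[j] ∈ cs := hs _ (List.getElem_mem hj)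
      have := List.idxOf_lt_length_of_mem hmem
      rw [hpt j hj] at this; exact this
    have hlen : s.length ≤ cs.length := by
      cases hsl : s.length with
      | zero => omega
      | succ n => have := hlt n (by omega); omega
    have hnd : s.Nodup := by
      have : (s.map cs.idxOf).Nodup := by rw [h]; exact List.nodup_range'
      exact this.of_map
    refine ⟨List.ext_getElem (by simp [Nat.min_eq_left hlen]) ?_, hnd⟩
    intro j hj1 hj2
    have hj : j < s.length := hj1
    have hcj : j < cs.length := hlt j hj
    have h1 : cs.idxOf (s[j]) = j := hpt j hj
    have h2 := List.getElem_idxOf (x := s[j]) (xs := cs) (by rw [h1]; exact hcj)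
    simp only [h1] at h2
    simp [List.getElem_take, h2]
  · rintro ⟨htake, hnd⟩
    have hndtake : (cs.take s.length).Nodup := htake ▸ hnd
    apply List.ext_getElem (by simp)
    intro j hj1 hj2
    have hj : j < s.length := by simpa using hj1
    have hjc : j < cs.length := by
      have : j < (cs.take s.length).length := by rw [← htake]; exact hj
      simp at this; omega
    have hsj : s[j] = cs[j] := by
      have hq : s[j]? = cs[j]? := by
        conv_lhs => rw [htake]
        simp [hj]
      simpa [List.getElem?_eq_getElem, hj, hjc] using hq
    simp only [List.getElem_map, List.getElem_range']
    rw [hsj, idxOf_take_nodup cs s.length hndtake j hj hjc]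
    omega

lemma filter_partition_le (p q : String → Bool) :
    ∀ (g : List String),
      (g.filter p).length + (g.filter (fun w => !p w && q w)).length ≤ g.length := by
  intro g
  induction g with
  | nil => simp
  | cons x t ih =>
    simp only [List.filter_cons]
    by_cases hp : p x
    · simp only [hp, Bool.not_true, Bool.false_and, if_true, List.length_cons, List.length]
      simp
      omega
    · by_cases hq : q x
      · simp [hp, hq]
        omega
      · simp [hp, hq]
        omega

lemma filter_partition_len (p q : String → Bool) :
    ∀ (g : List String),
      ((g.filter p).length + (g.filter (fun w => !p w && q w)).length = g.length) ↔
        g.all (fun w => p w || q w) = true := by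
  intro g
  induction g with
  | nil => simp
  | cons w rest ih =>
    have hle := filter_partition_le p q rest
    by_cases hp : p w
    · simp only [List.filter_cons, hp, List.all_cons, Bool.not_true, Bool.false_and]
      simp [← ih]
      omega
    · by_cases hq : q w
      · simp only [List.filter_cons, List.all_cons]
        simp [hp, hq, ← ih]
        omega
      · simp only [List.filter_cons, List.all_cons]
        simp [hp, hq]
        omega

lemma set_contains_ofList (c : List String) (w : String) :
    PySem.Set.contains (PySem.Set.ofList c) w = c.contains w := by
  by_cases h : w ∈ c <;>
    simp [PySem.Set.contains_eq_listContains, h, PySem.Set.mem_ofList]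

lemma set_len_eq_iff (s : List String) :
    (PySem.Set.ofList s).length = s.length ↔ s.Nodup := by
  have hp : (PySem.Set.ofList s).Perm s.dedup := by
    rw [List.perm_ext_iff_of_nodup (PySem.Set.nodup_ofList _) (List.nodup_dedup s)]
    intro x; rw [PySem.Set.mem_ofList, List.mem_dedup]
  rw [hp.length_eq]
  constructor
  · intro h
    have := (List.dedup_sublist s).eq_of_length h
    exact this ▸ List.nodup_dedup s
  · intro h; rw [List.Nodup.dedup h]

-- after A's loop succeeds, the tail of A reduces to the two checkId tests
lemma tailA_eq (c1 c2 : List Nat) :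
    (if c1 ≠ [] ∧ checkIdA c1 0 = false then "No"
     else if c2 ≠ [] ∧ checkIdA c2 0 = false then "No"
     else "Yes") =
      (if checkIdA c1 0 = true ∧ checkIdA c2 0 = true then "Yes" else "No") := by
  cases h1 : checkIdA c1 0 <;> cases h2 : checkIdA c2 0 <;>
    rcases c1 with _ | ⟨x, t⟩ <;> rcases c2 with _ | ⟨y, u⟩ <;>
      simp_all [checkIdA]

lemma mem_of_contains {c : List String} {w : String} (h : c.contains w = true) : w ∈ c := by
  simpa using h

theorem solution_eq_alt (cards1 cards2 goal : List String) :
    solution cards1 cards2 goal = solution_alt cards1 cards2 goal := by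
  unfold solution solution_alt
  simp only [set_contains_ofList]
  rw [loopA_char]
  by_cases hall : goal.all (fun w => cards1.contains w || cards2.contains w) = true
  · rw [if_pos hall]
    simp only [List.nil_append]
    set s1 := goal.filter (fun w => cards1.contains w) with hs1
    set s2 := goal.filter (fun w => !cards1.contains w && cards2.contains w) with hs2
    refine Eq.trans (tailA_eq (s1.map cards1.idxOf) (s2.map cards2.idxOf)) ?_
    have hlen : s1.length + s2.length = goal.length :=
      (filter_partition_len (fun w => cards1.contains w) (fun w => cards2.contains w) goal).mpr hall
    rw [if_neg (show ¬(s1.length + s2.length ≠ goal.length) from by omega)]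
    have hsub1 : ∀ w ∈ s1, w ∈ cards1 := by
      intro w hw
      exact mem_of_contains (List.of_mem_filter hw)
    have hsub2 : ∀ w ∈ s2, w ∈ cards2 := by
      intro w hw
      have := List.of_mem_filter hw
      simp only [Bool.and_eq_true] at this
      exact mem_of_contains this.2
    have e1 : checkIdA (s1.map cards1.idxOf) 0 = true ↔
        (s1 = cards1.take s1.length ∧ s1.Nodup) := by
      rw [checkId_char, List.length_map]
      exact map_idxOf_eq_range_iff cards1 s1 hsub1
    have e2 : checkIdA (s2.map cards2.idxOf) 0 = true ↔
        (s2 = cards2.take s2.length ∧ s2.Nodup) := by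
      rw [checkId_char, List.length_map]
      exact map_idxOf_eq_range_iff cards2 s2 hsub2
    by_cases hc : s1 = cards1.take s1.length ∧ (PySem.Set.ofList s1).length = s1.length ∧
        s2 = cards2.take s2.length ∧ (PySem.Set.ofList s2).length = s2.length
    · rw [if_pos hc]
      obtain ⟨h1, h2, h3, h4⟩ := hc
      rw [if_pos ⟨e1.mpr ⟨h1, (set_len_eq_iff s1).mp h2⟩, e2.mpr ⟨h3, (set_len_eq_iff s2).mp h4⟩⟩]
    · have hnc : ¬(checkIdA (s1.map cards1.idxOf) 0 = true ∧
          checkIdA (s2.map cards2.idxOf) 0 = true) := by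
        rintro ⟨h1, h2⟩
        obtain ⟨ht1, hn1⟩ := e1.mp h1
        obtain ⟨ht2, hn2⟩ := e2.mp h2
        exact hc ⟨ht1, (set_len_eq_iff s1).mpr hn1, ht2, (set_len_eq_iff s2).mpr hn2⟩
      rw [if_neg hc, if_neg hnc]
  · rw [if_neg hall]
    have : ¬ (goal.filter (fun w => cards1.contains w)).length +
        (goal.filter (fun w => !cards1.contains w && cards2.contains w)).length = goal.length := by
      intro h
      exact hall ((filter_partition_len _ _ goal).mp h)
    rw [if_pos this]

-- ===== VERDICT (by name: the statement is the Claim_ definition above) =====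
theorem solution_spec : Claim_equal_solution := by
  intro cards1 cards2 goal _
  unfold Spec_solution
  exact solution_eq_alt cards1 cards2 goal
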